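-- pv_equiv track=rewrite | github.com/ChrisLomont/88x31-GIF-Images | removedups.py | takeShortest
-- ===== SOURCE A (Python) =====
-- def takeShortest(items):
--     lo = items.copy()
--     hi = []
--
--     while len(lo)>1:
--         if len(lo[0])<=len(lo[1]):
--             hi.append(lo[1])
--             lo.remove(lo[1])
--         elif len(lo[0])>len(lo[1]):
--             hi.append(lo[0])
--             lo.remove(lo[0])
--
--     return lo,hi
-- ===== SOURCE B (Python) =====
-- def takeShortest(items):
--     # Single pass: keep the running shortest (earliest on tie) as candidate,
--     # appending each loser to hi in the order it is discarded.
--     if not items: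
--         return [], []
--     cand = items[0]
--     hi = []
--     for x in items[1:]:
--         if len(cand) <= len(x):
--             hi.append(x)
--         else:
--             hi.append(cand)
--             cand = x
--     return [cand], hi
-- ===== Notes on version B (the rewrite author's own statement) =====
-- stated objective: faster
-- what changed: Replaces the quadratic while-loop that repeatedly calls list.remove on the first two elements with a single linear pass keeping the running shortest candidate and appending each loser to hi.
import Mathlib
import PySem

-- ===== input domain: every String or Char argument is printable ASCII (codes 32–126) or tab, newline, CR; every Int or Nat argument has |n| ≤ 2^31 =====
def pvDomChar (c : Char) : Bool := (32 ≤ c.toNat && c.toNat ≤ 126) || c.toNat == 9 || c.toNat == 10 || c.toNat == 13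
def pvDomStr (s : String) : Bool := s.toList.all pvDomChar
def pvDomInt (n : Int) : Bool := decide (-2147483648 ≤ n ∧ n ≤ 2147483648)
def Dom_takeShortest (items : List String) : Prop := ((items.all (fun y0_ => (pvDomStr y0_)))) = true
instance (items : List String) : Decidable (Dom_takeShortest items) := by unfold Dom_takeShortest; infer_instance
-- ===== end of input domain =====

-- B replaces A's quadratic remove-based while loop by one linear pass tracking the running shortest candidate (faster, asymptotic).


-- ===== PORT A =====
-- while len(lo)>1: compare lo[0], lo[1]; hi.append the loser; lo.remove(loser).
-- lo.remove is PySem.List.remove? (first occurrence); it never fails here (the element is in lo), getD is the unreachable default.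
def takeShortestLoop (lo hi : List String) : List String × List String :=
  match lo with
  | x :: y :: rest =>
      if (PySem.Str.len x) ≤ (PySem.Str.len y) then
        takeShortestLoop ((PySem.List.remove? (x :: y :: rest) y).getD (x :: y :: rest)) (hi ++ [y])
      else
        takeShortestLoop ((PySem.List.remove? (x :: y :: rest) x).getD (x :: y :: rest)) (hi ++ [x])
  | _ => (lo, hi)
termination_by lo.length
decreasing_by
  · by_cases hxy : x = y
    · subst hxy; simp [PySem.List.remove?_cons_self]
    · simp [PySem.List.remove?_cons_of_ne _ hxy, PySem.List.remove?_cons_self]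
  · simp [PySem.List.remove?_cons_self]

def takeShortest (items : List String) : List String × List String :=
  takeShortestLoop items []

-- ===== PORT B =====
def takeShortestAltLoop (cand : String) (hi : List String) : List String → List String × List String
  | [] => ([cand], hi)
  | x :: rest =>
      if (PySem.Str.len cand) ≤ (PySem.Str.len x) then
        takeShortestAltLoop cand (hi ++ [x]) rest
      else
        takeShortestAltLoop x (hi ++ [cand]) rest

def takeShortest_alt (items : List String) : List String × List String :=
  match items with
  | [] => ([], [])
  | x :: rest => takeShortestAltLoop x [] rest

-- ===== PRECONDITION & SPEC =====
def Spec_takeShortest (items : List String) (out : List String × List String) : Prop := out = takeShortest_alt items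
instance (items : List String) (out : List String × List String) : Decidable (Spec_takeShortest items out) := by unfold Spec_takeShortest; infer_instance

-- ===== CLAIM (what is proved, stated in full; the proofs are below) =====
def Claim_equal_takeShortest : Prop := ∀ (items : List String), Dom_takeShortest items → Spec_takeShortest items (takeShortest items)

-- ===== LEMMAS AND PROOFS =====
theorem loop_eq (rest : List String) : ∀ (cand : String) (hi : List String),
    takeShortestLoop (cand :: rest) hi = takeShortestAltLoop cand hi rest := by
  induction rest with
  | nil => intro cand hi; simp [takeShortestLoop, takeShortestAltLoop]
  | cons x rest ih =>
      intro cand hi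
      rw [takeShortestLoop, takeShortestAltLoop]
      by_cases hle : PySem.Str.len cand ≤ PySem.Str.len x
      · simp only [if_pos hle]
        by_cases hcx : cand = x
        · subst hcx; rw [PySem.List.remove?_cons_self]; simp [ih]
        · rw [PySem.List.remove?_cons_of_ne _ hcx, PySem.List.remove?_cons_self]
          simp [ih]
      · simp only [if_neg hle]
        rw [PySem.List.remove?_cons_self]
        simp [ih]

-- ===== VERDICT (by name: the statement is the Claim_ definition above) =====
theorem takeShortest_spec : Claim_equal_takeShortest := by
  intro items _
  unfold Spec_takeShortest takeShortest takeShortest_alt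
  match items with
  | [] => simp [takeShortestLoop]
  | x :: rest => exact loop_eq rest x []
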